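-- pv_equiv track=rewrite | github.com/dariosky/limsync | src/limsync/review_tui.py | _ops_direction_marker
-- ===== SOURCE A (Python) =====
-- def _ops_direction_marker(kinds: list[str]) -> str:
--     if not kinds:
--         return ""
--     has_left = any(
--         kind in {"copy_left", "metadata_update_left", "delete_left"} for kind in kinds
--     )
--     has_right = any(
--         kind in {"copy_right", "metadata_update_right", "delete_right"}
--         for kind in kinds
--     )
--     has_delete = any(kind in {"delete_left", "delete_right"} for kind in kinds)
--     if has_delete:
--         return " DEL<- " if "delete_left" in kinds else " DEL-> "
--     if has_left and has_right:
--         return " <-> "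
--     if has_left:
--         return " <- "
--     if has_right:
--         return " -> "
--     return ""
-- ===== SOURCE B (Python) =====
-- # Bitmask-table formulation: each kind maps to a 4-bit code
-- # (bit0 = left op, bit1 = right op, bit2 = delete_left, bit3 = delete_right);
-- # the OR of all codes indexes a precomputed 16-entry marker table.
-- _CODE = {
--     "copy_left": 1,
--     "metadata_update_left": 1,
--     "delete_left": 5,
--     "copy_right": 2,
--     "metadata_update_right": 2,
--     "delete_right": 10,
-- }
-- _MARKER = [
--     "", " <- ", " -> ", " <-> ",
--     " DEL<- ", " DEL<- ", " DEL<- ", " DEL<- ",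
--     " DEL-> ", " DEL-> ", " DEL-> ", " DEL-> ",
--     " DEL<- ", " DEL<- ", " DEL<- ", " DEL<- ",
-- ]
--
--
-- def _ops_direction_marker(kinds: list[str]) -> str:
--     mask = 0
--     for kind in kinds:
--         mask |= _CODE.get(kind, 0)
--     return _MARKER[mask]
-- ===== Notes on version B (the rewrite author's own statement) =====
-- stated objective: alternative
-- what changed: Replaced the four membership scans and the priority branch cascade by a table-driven formulation: each kind maps through a dict to a 4-bit code, the codes are OR-ed into a mask in one pass, and the result is a direct index into a precomputed 16-entry marker table (no branching cascade at all).
import Mathlib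
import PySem

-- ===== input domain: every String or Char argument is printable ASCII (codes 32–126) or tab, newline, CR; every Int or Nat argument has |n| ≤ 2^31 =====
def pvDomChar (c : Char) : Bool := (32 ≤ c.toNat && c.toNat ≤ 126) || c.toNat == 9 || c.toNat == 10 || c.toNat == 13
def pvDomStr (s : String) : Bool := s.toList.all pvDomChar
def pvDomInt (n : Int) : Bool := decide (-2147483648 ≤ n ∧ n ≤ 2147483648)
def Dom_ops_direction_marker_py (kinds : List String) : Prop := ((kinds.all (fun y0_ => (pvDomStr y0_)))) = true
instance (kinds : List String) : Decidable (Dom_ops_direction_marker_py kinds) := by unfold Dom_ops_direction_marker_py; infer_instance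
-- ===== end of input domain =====

-- B replaces A's four scans and branch cascade by a bitmask OR over a per-kind code dict
-- plus a 16-entry marker table lookup (objective: alternative / table formulation).


-- ===== PORT A =====
-- literal transliteration of A: empty guard, three any-scans, one 'in' scan, cascade
def ops_direction_marker_py (kinds : List String) : String :=
  if kinds = [] then ""
  else
    let has_left := kinds.any (fun kind =>
      kind == "copy_left" || kind == "metadata_update_left" || kind == "delete_left")
    let has_right := kinds.any (fun kind =>
      kind == "copy_right" || kind == "metadata_update_right" || kind == "delete_right")
    let has_delete := kinds.any (fun kind => kind == "delete_left" || kind == "delete_right")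
    if has_delete then
      if kinds.contains "delete_left" then " DEL<- " else " DEL-> "
    else if has_left && has_right then " <-> "
    else if has_left then " <- "
    else if has_right then " -> "
    else ""

-- ===== PORT B =====
-- _CODE: each kind's 4-bit code (bit0 left, bit1 right, bit2 delete_left, bit3 delete_right)
def pvCodeDict : PySem.Dict String Nat := PySem.Dict.mk
  [("copy_left", 1), ("metadata_update_left", 1), ("delete_left", 5),
   ("copy_right", 2), ("metadata_update_right", 2), ("delete_right", 10)]

-- _MARKER: the 16-entry table indexed by the OR of the codes
def pvMarker : List String :=
  ["", " <- ", " -> ", " <-> ",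
   " DEL<- ", " DEL<- ", " DEL<- ", " DEL<- ",
   " DEL-> ", " DEL-> ", " DEL-> ", " DEL-> ",
   " DEL<- ", " DEL<- ", " DEL<- ", " DEL<- "]

-- B: mask = OR of _CODE.get(kind, 0); return _MARKER[mask]
-- (mask ≤ 15 always holds, so Python's _MARKER[mask] never raises; getD is exact here)
def ops_direction_marker_py_alt (kinds : List String) : String :=
  let mask := kinds.foldl (fun m kind => m ||| PySem.Dict.getD pvCodeDict kind 0) 0
  pvMarker.getD mask ""

-- ===== PRECONDITION & SPEC =====
def Spec_ops_direction_marker_py (kinds : List String) (out : String) : Prop := out = ops_direction_marker_py_alt kinds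
instance (kinds : List String) (out : String) : Decidable (Spec_ops_direction_marker_py kinds out) := by unfold Spec_ops_direction_marker_py; infer_instance

-- ===== CLAIM (what is proved, stated in full; the proofs are below) =====
def Claim_equal_ops_direction_marker_py : Prop := ∀ (kinds : List String), Dom_ops_direction_marker_py kinds → Spec_ops_direction_marker_py kinds (ops_direction_marker_py kinds)

-- ===== LEMMAS AND PROOFS =====

-- the mask expressed through the four presence flags
def pvF (l r dl dr : Bool) : Nat :=
  (cond l 1 0) ||| (cond r 2 0) ||| (cond dl 4 0) ||| (cond dr 8 0)

-- one fold step: OR-ing in a kind's code updates exactly the four flags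
theorem pv_step (x : String) (l r dl dr : Bool) :
    pvF l r dl dr ||| PySem.Dict.getD pvCodeDict x 0
    = pvF (l || (x == "copy_left" || x == "metadata_update_left" || x == "delete_left"))
          (r || (x == "copy_right" || x == "metadata_update_right" || x == "delete_right"))
          (dl || x == "delete_left") (dr || x == "delete_right") := by
  by_cases h1 : x = "copy_left"
  · subst h1; cases l <;> cases r <;> cases dl <;> cases dr <;> decide
  by_cases h2 : x = "metadata_update_left"
  · subst h2; cases l <;> cases r <;> cases dl <;> cases dr <;> decide
  by_cases h3 : x = "delete_left"
  · subst h3; cases l <;> cases r <;> cases dl <;> cases dr <;> decide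
  by_cases h4 : x = "copy_right"
  · subst h4; cases l <;> cases r <;> cases dl <;> cases dr <;> decide
  by_cases h5 : x = "metadata_update_right"
  · subst h5; cases l <;> cases r <;> cases dl <;> cases dr <;> decide
  by_cases h6 : x = "delete_right"
  · subst h6; cases l <;> cases r <;> cases dl <;> cases dr <;> decide
  · have g1 : (x == "copy_left") = false := by simp [h1]
    have g2 : (x == "metadata_update_left") = false := by simp [h2]
    have g3 : (x == "delete_left") = false := by simp [h3]
    have g4 : (x == "copy_right") = false := by simp [h4]
    have g5 : (x == "metadata_update_right") = false := by simp [h5]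
    have g6 : (x == "delete_right") = false := by simp [h6]
    have hd : PySem.Dict.getD pvCodeDict x 0 = 0 := by
      simp [pvCodeDict, PySem.Dict.getD, PySem.Dict.get?, beq_iff_eq,
        Ne.symm h1, Ne.symm h2, Ne.symm h3, Ne.symm h4, Ne.symm h5, Ne.symm h6]
    simp [hd, g1, g2, g3, g4, g5, g6]

-- the whole fold, from any flag state
theorem pv_mask (kinds : List String) (l r dl dr : Bool) :
    kinds.foldl (fun m kind => m ||| PySem.Dict.getD pvCodeDict kind 0) (pvF l r dl dr)
    = pvF (l || kinds.any (fun kind =>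
            kind == "copy_left" || kind == "metadata_update_left" || kind == "delete_left"))
          (r || kinds.any (fun kind =>
            kind == "copy_right" || kind == "metadata_update_right" || kind == "delete_right"))
          (dl || kinds.contains "delete_left")
          (dr || kinds.contains "delete_right") := by
  induction kinds generalizing l r dl dr with
  | nil => simp
  | cons x xs ih =>
    simp only [List.foldl_cons, pv_step, ih, List.any_cons, List.contains_cons]
    cases hx : x == "delete_left" <;> cases hx2 : x == "delete_right" <;>
      simp [hx, hx2, BEq.comm, Bool.or_assoc]

-- the fold from the actual initial mask 0
theorem pv_mask0 (kinds : List String) :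
    kinds.foldl (fun m kind => m ||| PySem.Dict.getD pvCodeDict kind 0) 0
    = pvF (kinds.any (fun kind =>
            kind == "copy_left" || kind == "metadata_update_left" || kind == "delete_left"))
          (kinds.any (fun kind =>
            kind == "copy_right" || kind == "metadata_update_right" || kind == "delete_right"))
          (kinds.contains "delete_left")
          (kinds.contains "delete_right") := by
  have h := pv_mask kinds false false false false
  simp only [Bool.false_or] at h
  exact h

-- A's has_delete scan equals the two contains flags
theorem pv_any_del (kinds : List String) :
    kinds.any (fun kind => kind == "delete_left" || kind == "delete_right")
      = (kinds.contains "delete_left" || kinds.contains "delete_right") := by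
  induction kinds with
  | nil => simp
  | cons x xs ih =>
    simp only [List.any_cons, List.contains_cons, ih]
    cases hx : x == "delete_left" <;> simp [BEq.comm, hx, Bool.or_left_comm]

-- ===== VERDICT (by name: the statement is the Claim_ definition above) =====
theorem ops_direction_marker_py_spec : Claim_equal_ops_direction_marker_py := by
  intro kinds _
  unfold Spec_ops_direction_marker_py ops_direction_marker_py ops_direction_marker_py_alt
  simp only [pv_mask0]
  cases kinds with
  | nil => decide
  | cons x xs =>
    simp only [reduceCtorEq, if_false, pv_any_del]
    cases hl : (x :: xs).any (fun kind =>
        kind == "copy_left" || kind == "metadata_update_left" || kind == "delete_left") <;>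
    cases hr : (x :: xs).any (fun kind =>
        kind == "copy_right" || kind == "metadata_update_right" || kind == "delete_right") <;>
    cases hdl : (x :: xs).contains "delete_left" <;>
    cases hdr : (x :: xs).contains "delete_right" <;>
      simp [pvF, pvMarker]
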